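-- pv_equiv track=rewrite | github.com/posl/comment_recommendation | script/mod_gen/3_time/ja/135_D/4.py | solve
-- ===== SOURCE A (Python) =====
-- def solve(s):
--     MOD = 10**9+7
--     dp = [[0]*13 for _ in range(len(s)+1)]
--     dp[0][0] = 1
--     for i in range(len(s)):
--         if s[i] == "?":
--             for j in range(10):
--                 for k in range(13):
--                     dp[i+1][(k*10+j)%13] += dp[i][k]
--         else:
--             for k in range(13):
--                 dp[i+1][(k*10+int(s[i]))%13] += dp[i][k]
--         for j in range(13):
--             dp[i+1][j] %= MOD
--     return dp[len(s)][5]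
-- ===== SOURCE B (Python) =====
-- def solve(s):
--     MOD = 10**9 + 7
--     pow10 = [pow(10, i, 13) for i in range(len(s))]
--     cnt = [1] + [0] * 12
--     for i, ch in enumerate(reversed(s)):
--         ds = range(10) if ch == "?" else [int(ch)]
--         new = [0] * 13
--         for d in ds:
--             off = d * pow10[i] % 13
--             for r in range(13):
--                 new[(r + off) % 13] = (new[(r + off) % 13] + cnt[r]) % MOD
--         cnt = new
--     return cnt[5]
-- ===== Notes on version B (the rewrite author's own statement) =====
-- stated objective: alternative
-- what changed: Replaces the left-to-right Horner recurrence (multiply state by 10, keep a full (n+1)x13 table) with a right-to-left place-value recurrence: pow10[i]=10^i mod 13 precomputed, a single size-13 remainder vector updated by additive offsets d*pow10[i], reduced mod 1e9+7 per write.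
import Mathlib
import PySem

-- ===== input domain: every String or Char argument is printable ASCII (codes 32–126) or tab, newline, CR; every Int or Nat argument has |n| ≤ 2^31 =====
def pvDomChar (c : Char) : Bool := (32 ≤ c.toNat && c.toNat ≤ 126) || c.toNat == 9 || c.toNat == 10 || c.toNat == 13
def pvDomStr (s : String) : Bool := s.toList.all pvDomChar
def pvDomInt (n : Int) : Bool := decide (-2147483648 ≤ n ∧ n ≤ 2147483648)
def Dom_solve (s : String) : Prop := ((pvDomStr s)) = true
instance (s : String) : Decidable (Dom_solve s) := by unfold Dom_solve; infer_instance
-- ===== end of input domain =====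

-- B replaces A's left-to-right Horner DP over an (n+1)x13 table by a right-to-left
-- place-value DP over a single 13-vector with a precomputed table of 10^i mod 13 (alternative decomposition, same cost).

-- ===== PORT A =====
def pvMOD : Int := 10^9+7

-- int(s[i]) on a one-character string (raises → none; Pre_ excludes that)
def pyIntChar (c : Char) : Int := (PySem.Int.ofStr? (String.ofList [c])).getD 0

-- 'dp[i+1][idx] += x'
def addAt (L : List Int) (i : Nat) (x : Int) : List Int := L.set i (L.getD i 0 + x)

-- the body of A's loop over i: build dp[i+1] from dp[i] (= row), then reduce mod 1e9+7
def rowA (row : List Int) (c : Char) : List Int :=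
  let next :=
    if c = '?' then
      (PySem.List.pyRange 0 10 1).foldl (fun acc j =>
        (PySem.List.pyRange 0 13 1).foldl (fun acc2 k =>
          addAt acc2 ((k*10+j) % 13).toNat (row.getD k.toNat 0)) acc)
        (List.replicate 13 0)
    else
      (PySem.List.pyRange 0 13 1).foldl (fun acc2 k =>
        addAt acc2 ((k*10 + pyIntChar c) % 13).toNat (row.getD k.toNat 0)) (List.replicate 13 0)
  next.map (fun x => x % pvMOD)

def solve (s : String) : Int :=
  (s.toList.foldl rowA (1 :: List.replicate 12 0)).getD 5 0

-- ===== PORT B =====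
-- ds = range(10) if ch == "?" else [int(ch)]
def addModAt (L : List Int) (i : Nat) (x : Int) : List Int := L.set i ((L.getD i 0 + x) % pvMOD)

def digList (c : Char) : List Int := if c = '?' then PySem.List.pyRange 0 10 1 else [pyIntChar c]

-- body of B's loop: one character ch at reversed position with pw = pow10[i]
def stepBImpl (pw : Int) (cnt : List Int) (c : Char) : List Int :=
  (digList c).foldl (fun nw d =>
    let off := d * pw % 13
    (PySem.List.pyRange 0 13 1).foldl (fun nw2 r =>
      addModAt nw2 ((r + off) % 13).toNat (cnt.getD r.toNat 0)) nw)
    (List.replicate 13 0)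

def solve_alt (s : String) : Int :=
  let pow10 := (List.range s.toList.length).map (fun i => (10:Int)^i % 13)
  ((PySem.List.enumerate s.toList.reverse).foldl
     (fun cnt p => stepBImpl (PySem.List.pyGetD pow10 p.1 0) cnt p.2)
     (1 :: List.replicate 12 0)).getD 5 0

-- ===== PRECONDITION & SPEC =====
-- Pre_ excludes exactly the strings containing a character that is neither a digit nor a
-- question mark, on which Python A raises ValueError at int(s[i]).
def Pre_solve (s : String) : Prop := (s.toList.all (fun c => c == '?' || c.isDigit)) = true
instance (s : String) : Decidable (Pre_solve s) := by unfold Pre_solve; infer_instance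
def pvWitness_solve : String := "1?3"

def Spec_solve (s : String) (out : Int) : Prop := out = solve_alt s
instance (s : String) (out : Int) : Decidable (Spec_solve s out) := by unfold Spec_solve; infer_instance

-- ===== CLAIM (what is proved, stated in full; the proofs are below) =====
def Claim_equal_solve : Prop := ∀ (s : String), Dom_solve s → Pre_solve s → Spec_solve s (solve s)

-- ===== LEMMAS AND PROOFS =====

-- abbreviations for the abstract (ZMod-valued) model used only in the proofs
def PB : ℕ := 10^9+7
def FV : Type := ZMod 13 → ZMod PB

def delta0 : FV := fun k => if k = 0 then 1 else 0

-- the 13 residues, as an explicit list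
def Z13 : List (ZMod 13) := [0,1,2,3,4,5,6,7,8,9,10,11,12]

-- the digit choices of c, cast into ZMod 13
def digsZ (c : Char) : List (ZMod 13) := (digList c).map (fun d => ((d : Int) : ZMod 13))

-- abstract A-step: distribution of 10*old + d over the digit choices of c
def stepAAbs (v : FV) (c : Char) : FV := fun t =>
  ((digsZ c).map (fun d => (Z13.map (fun k => if 10*k + d = t then v k else 0)).sum)).sum

-- abstract B-step: distribution of old + d*pw
def stepBAbs (pw : ZMod 13) (v : FV) (c : Char) : FV := fun t =>
  ((digsZ c).map (fun d => v (t - d * pw))).sum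

def semB : List Char → FV
  | [] => delta0
  | c :: rest => stepBAbs (10 ^ rest.length) (semB rest) c

-- cast a concrete 13-vector to the abstract model
def toFV (L : List Int) : FV := fun t => ((L.getD t.val 0 : ℤ) : ZMod PB)


-- ===== LEMMAS AND PROOFS =====

lemma pvMOD_pos : (0:Int) < pvMOD := by norm_num [pvMOD]

-- ---- basic list-update lemmas ----
lemma addAt_length (L : List Int) (i : Nat) (x : Int) : (addAt L i x).length = L.length := by
  simp [addAt]

lemma getD_addAt (L : List Int) (i : Nat) (x : Int) (t : Nat) (ht : t < L.length) :
    (addAt L i x).getD t 0 = L.getD t 0 + if i = t then x else 0 := by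
  rcases eq_or_ne i t with rfl | hne
  · simp [addAt, List.getD_eq_getElem?_getD, List.getElem?_set_self', ht, List.getElem?_eq_getElem ht]
  · simp [addAt, List.getD_eq_getElem?_getD, List.getElem?_set_ne hne, hne]

-- fold of '+=' updates: value at t = initial + matching contributions
lemma foldl_addAt_length (ks : List Int) (f : Int → Nat) (g : Int → Int) (init : List Int) :
    ((ks.foldl (fun acc k => addAt acc (f k) (g k)) init).length) = init.length := by
  induction ks generalizing init with
  | nil => rfl
  | cons k ks ih => simp [List.foldl_cons, ih, addAt_length]

lemma foldl_addAt_getD (ks : List Int) (f : Int → Nat) (g : Int → Int) (init : List Int)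
    (t : Nat) (ht : t < init.length) :
    ((ks.foldl (fun acc k => addAt acc (f k) (g k)) init).getD t 0)
      = init.getD t 0 + (ks.map (fun k => if f k = t then g k else 0)).sum := by
  induction ks generalizing init with
  | nil => simp
  | cons k ks ih =>
      rw [List.foldl_cons, ih _ (by simp [addAt_length, ht]), getD_addAt _ _ _ _ ht]
      simp [add_assoc]

-- ===== done block 1 =====

-- ---- addModAt (B's '(new[idx] + cnt[r]) % MOD' write) ----
lemma addModAt_length (L : List Int) (i : Nat) (x : Int) : (addModAt L i x).length = L.length := by
  simp [addModAt]

lemma getD_addModAt (L : List Int) (i : Nat) (x : Int) (t : Nat) (ht : t < L.length) :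
    (addModAt L i x).getD t 0 = if i = t then (L.getD t 0 + x) % pvMOD else L.getD t 0 := by
  rcases eq_or_ne i t with rfl | hne
  · simp [addModAt, List.getD_eq_getElem?_getD, ht]
  · simp [addModAt, List.getD_eq_getElem?_getD, List.getElem?_set_ne hne, hne]

lemma foldl_addModAt_length (ks : List Int) (f : Int → Nat) (g : Int → Int) (init : List Int) :
    ((ks.foldl (fun acc k => addModAt acc (f k) (g k)) init).length) = init.length := by
  induction ks generalizing init with
  | nil => rfl
  | cons k ks ih => simp [List.foldl_cons, ih, addModAt_length]

lemma foldl_addModAt_cast (ks : List Int) (f : Int → Nat) (g : Int → Int) (init : List Int)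
    (t : Nat) (ht : t < init.length) :
    (((ks.foldl (fun acc k => addModAt acc (f k) (g k)) init).getD t 0 : Int) : ZMod PB)
      = ((init.getD t 0 : Int) : ZMod PB)
        + (ks.map (fun k => if f k = t then ((g k : Int) : ZMod PB) else 0)).sum := by
  induction ks generalizing init with
  | nil => simp
  | cons k ks ih =>
      rw [List.foldl_cons, ih _ (by simp [addModAt_length, ht]), getD_addModAt _ _ _ _ ht]
      simp only [List.map_cons, List.sum_cons]
      split_ifs with h
      · have hc : (((init.getD t 0 + g k) % pvMOD : Int) : ZMod PB) = ((init.getD t 0 : Int) : ZMod PB) + ((g k : Int) : ZMod PB) := by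
          have h2 : (pvMOD : Int) = ((PB : ℕ) : ℤ) := by norm_num [PB, pvMOD]
          rw [h2, ZMod.intCast_mod]; push_cast; ring
        rw [hc]; ring
      · ring

lemma foldl_addModAt_bound (ks : List Int) (f : Int → Nat) (g : Int → Int) (init : List Int)
    (hinit : ∀ t : Nat, 0 ≤ init.getD t 0 ∧ init.getD t 0 < pvMOD) :
    ∀ t : Nat, 0 ≤ (ks.foldl (fun acc k => addModAt acc (f k) (g k)) init).getD t 0
      ∧ (ks.foldl (fun acc k => addModAt acc (f k) (g k)) init).getD t 0 < pvMOD := by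
  induction ks generalizing init with
  | nil => exact hinit
  | cons k ks ih =>
      refine ih _ (fun t => ?_)
      by_cases ht : t < init.length
      · rw [getD_addModAt _ _ _ _ ht]
        split_ifs
        · exact ⟨Int.emod_nonneg _ (by norm_num [pvMOD]), Int.emod_lt_of_pos _ pvMOD_pos⟩
        · exact hinit t
      · rw [List.getD_eq_default _ _ (by simp [addModAt_length]; omega)]
        exact ⟨le_refl 0, pvMOD_pos⟩

-- ---- index/cast helpers ----
lemma cast13 (x : Int) : (((x % 13).toNat : ℕ) : ZMod 13) = ((x : ℤ) : ZMod 13) := by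
  rw [← Int.cast_natCast, Int.toNat_of_nonneg (Int.emod_nonneg x (by norm_num))]
  rw [show ((13:ℤ)) = ((13:ℕ):ℤ) by norm_num, ZMod.intCast_mod]

lemma castIdx (x : Int) (t : ZMod 13) :
    (((x % 13).toNat = t.val) ↔ ((x : ZMod 13) = t)) := by
  constructor
  · intro h
    rw [← cast13, h, ZMod.natCast_val, ZMod.cast_id]
  · intro h
    have hlt : (x % 13).toNat < 13 := by
      have := Int.emod_lt_of_pos x (b := 13) (by norm_num)
      have := Int.emod_nonneg x (show (13:ℤ) ≠ 0 by norm_num)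
      omega
    have h2 : (((x % 13).toNat : ℕ) : ZMod 13).val = t.val := by rw [cast13, h]
    rwa [ZMod.val_cast_of_lt hlt] at h2

lemma val13 (k : Int) (h0 : 0 ≤ k) (h1 : k < 13) : ((k : ZMod 13)).val = k.toNat := by
  have : ((k.toNat : ℕ) : ZMod 13).val = k.toNat % 13 := ZMod.val_natCast (n := 13) k.toNat
  rw [← Int.cast_natCast, Int.toNat_of_nonneg h0] at this
  rw [this, Nat.mod_eq_of_lt (by omega)]

-- sum over the concrete range(13) = sum over Z13
lemma sum13 (F : Int → ZMod PB) (h : ZMod 13 → ZMod PB)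
    (hFk : ∀ k : Int, 0 ≤ k → k < 13 → F k = h ((k : ZMod 13))) :
    ((PySem.List.pyRange 0 13 1).map F).sum = (Z13.map h).sum := by
  have hr : PySem.List.pyRange 0 13 1 = [0,1,2,3,4,5,6,7,8,9,10,11,12] := by decide
  rw [hr]
  simp only [Z13, List.map_cons, List.map_nil, List.sum_cons, List.sum_nil, add_zero]
  rw [hFk 0 (by norm_num) (by norm_num), hFk 1 (by norm_num) (by norm_num),
      hFk 2 (by norm_num) (by norm_num), hFk 3 (by norm_num) (by norm_num),
      hFk 4 (by norm_num) (by norm_num), hFk 5 (by norm_num) (by norm_num),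
      hFk 6 (by norm_num) (by norm_num), hFk 7 (by norm_num) (by norm_num),
      hFk 8 (by norm_num) (by norm_num), hFk 9 (by norm_num) (by norm_num),
      hFk 10 (by norm_num) (by norm_num), hFk 11 (by norm_num) (by norm_num),
      hFk 12 (by norm_num) (by norm_num)]
  norm_num

-- ---- generic list-sum lemmas over ZMod PB ----
lemma sum_map_add' {α : Type} (L : List α) (f g : α → ZMod PB) :
    (L.map (fun x => f x + g x)).sum = (L.map f).sum + (L.map g).sum := by
  induction L with
  | nil => simp
  | cons a L ih => simp [ih]; ring

lemma sum_swap' {α β : Type} (L : List α) (M : List β) (h : α → β → ZMod PB) :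
    (L.map (fun d => (M.map (fun k => h d k)).sum)).sum
      = (M.map (fun k => (L.map (fun d => h d k)).sum)).sum := by
  induction L with
  | nil => simp
  | cons d L ih => simp only [List.map_cons, List.sum_cons, ih, sum_map_add']

lemma sum_ite_eq' {α : Type} [DecidableEq α] (L : List α) (a : α) (hnd : L.Nodup) (ha : a ∈ L)
    (f : α → ZMod PB) :
    (L.map (fun k => if a = k then f k else 0)).sum = f a := by
  induction L with
  | nil => cases ha
  | cons b L ih =>
      rcases List.mem_cons.mp ha with rfl | hmem
      · simp only [List.map_cons, List.sum_cons, if_pos rfl]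
        have : (L.map (fun k => if a = k then f k else 0)).sum = 0 := by
          apply List.sum_eq_zero
          intro x hx
          rcases List.mem_map.mp hx with ⟨k, hk, rfl⟩
          have : a ≠ k := fun h => ((List.nodup_cons.mp hnd).1 (h ▸ hk))
          simp [this]
        simp [this]
      · have hba : b ≠ a := fun h => ((List.nodup_cons.mp hnd).1 (h ▸ hmem))
        simp only [List.map_cons, List.sum_cons, if_neg (Ne.symm hba),
          ih (List.nodup_cons.mp hnd).2 hmem, zero_add]

lemma mem_Z13 (a : ZMod 13) : a ∈ Z13 := by revert a; decide
lemma nodup_Z13 : Z13.Nodup := by decide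

-- collapse of A's abstract step against a weight function
lemma collapseA (v w : FV) (c : Char) :
    (Z13.map (fun k => stepAAbs v c k * w k)).sum
      = ((digsZ c).map (fun d => (Z13.map (fun m => v m * w (10*m + d))).sum)).sum := by
  have h1 : (Z13.map (fun k => stepAAbs v c k * w k)).sum
      = (Z13.map (fun k => ((digsZ c).map (fun d =>
          (Z13.map (fun m => if 10*m + d = k then v m * w k else 0)).sum)).sum)).sum := by
    apply congrArg List.sum
    apply List.map_congr_left
    intro k _
    simp only [stepAAbs]
    rw [← List.sum_map_mul_right]
    apply congrArg List.sum
    apply List.map_congr_left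
    intro d _
    rw [← List.sum_map_mul_right]
    apply congrArg List.sum
    apply List.map_congr_left
    intro m _
    rw [ite_mul, zero_mul]
  rw [h1, sum_swap' Z13 (digsZ c)]
  apply congrArg List.sum
  apply List.map_congr_left
  intro d _
  rw [sum_swap' Z13 Z13]
  apply congrArg List.sum
  apply List.map_congr_left
  intro m _
  rw [sum_ite_eq' Z13 (10*m + d) nodup_Z13 (mem_Z13 _) (fun k => v m * w k)]

-- expansion of B's abstract step under the weights of the main lemma
lemma expandB (v u : FV) (c : Char) (pw : ZMod 13) (t : ZMod 13) :
    (Z13.map (fun m => v m * stepBAbs pw u c (t - 10 * pw * m))).sum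
      = ((digsZ c).map (fun d => (Z13.map (fun m => v m * u (t - 10 * pw * m - d * pw))).sum)).sum := by
  have h1 : (Z13.map (fun m => v m * stepBAbs pw u c (t - 10 * pw * m))).sum
      = (Z13.map (fun m => ((digsZ c).map (fun d =>
          v m * u (t - 10 * pw * m - d * pw))).sum)).sum := by
    apply congrArg List.sum
    apply List.map_congr_left
    intro m _
    simp only [stepBAbs]
    rw [← List.sum_map_mul_left]
  rw [h1, sum_swap' Z13 (digsZ c)]

theorem mainAbs' (cs : List Char) (v : FV) (t : ZMod 13) :
    (cs.foldl stepAAbs v) t = (Z13.map (fun k => v k * semB cs (t - 10 ^ cs.length * k))).sum := by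
  induction cs generalizing v t with
  | nil =>
      simp only [List.foldl_nil, semB, List.length_nil, pow_zero, one_mul, delta0,
        mul_ite, mul_one, mul_zero, sub_eq_zero]
      rw [sum_ite_eq' Z13 t nodup_Z13 (mem_Z13 _) (fun k => v k)]
  | cons c rest ih =>
      rw [List.foldl_cons, ih, collapseA]
      have hRHS : (Z13.map (fun k => v k * semB (c :: rest) (t - 10 ^ (c :: rest).length * k))).sum
          = ((digsZ c).map (fun d => (Z13.map (fun m =>
              v m * semB rest (t - 10 * 10 ^ rest.length * m - d * 10 ^ rest.length))).sum)).sum := by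
        have e : ∀ k : ZMod 13, t - 10 ^ (c :: rest).length * k = t - 10 * 10 ^ rest.length * k := by
          intro k; simp only [List.length_cons]; ring
        simp only [e, semB]
        exact expandB v (semB rest) c (10 ^ rest.length) t
      rw [hRHS]
      apply congrArg List.sum
      apply List.map_congr_left
      intro d _
      apply congrArg List.sum
      apply List.map_congr_left
      intro m _
      have harg : t - 10 ^ rest.length * (10*m + d)
          = t - 10 * 10 ^ rest.length * m - d * 10 ^ rest.length := by ring
      rw [harg]

theorem absAB' (cs : List Char) (t : ZMod 13) :
    (cs.foldl stepAAbs delta0) t = semB cs t := by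
  rw [mainAbs']
  have h1 : (Z13.map (fun k => delta0 k * semB cs (t - 10 ^ cs.length * k))).sum
      = (Z13.map (fun k => if (0:ZMod 13) = k then semB cs (t - 10 ^ cs.length * k) else 0)).sum := by
    apply congrArg List.sum
    apply List.map_congr_left
    intro k _
    simp only [delta0]
    rcases eq_or_ne k 0 with rfl | h
    · simp
    · simp [h, Ne.symm h]
  rw [h1, sum_ite_eq' Z13 0 nodup_Z13 (mem_Z13 _)]
  simp

-- ---- nested (two-loop) fold lemmas ----
lemma foldl2_addAt_length (js ks : List Int) (f : Int → Int → Nat) (g : Int → Int → Int)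
    (init : List Int) :
    ((js.foldl (fun acc j => ks.foldl (fun acc2 k => addAt acc2 (f j k) (g j k)) acc) init).length)
      = init.length := by
  induction js generalizing init with
  | nil => rfl
  | cons j js ih => rw [List.foldl_cons, ih, foldl_addAt_length]

lemma foldl2_addAt_getD (js ks : List Int) (f : Int → Int → Nat) (g : Int → Int → Int)
    (init : List Int) (t : Nat) (ht : t < init.length) :
    ((js.foldl (fun acc j => ks.foldl (fun acc2 k => addAt acc2 (f j k) (g j k)) acc) init).getD t 0)
      = init.getD t 0
        + (js.map (fun j => (ks.map (fun k => if f j k = t then g j k else 0)).sum)).sum := by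
  induction js generalizing init with
  | nil => simp
  | cons j js ih =>
      rw [List.foldl_cons, ih _ (by rw [foldl_addAt_length]; exact ht),
        foldl_addAt_getD ks (f j) (g j) init t ht]
      simp only [List.map_cons, List.sum_cons]
      ring

lemma foldl2_addModAt_cast (js ks : List Int) (f : Int → Int → Nat) (g : Int → Int → Int)
    (init : List Int) (t : Nat) (ht : t < init.length) :
    (((js.foldl (fun acc j => ks.foldl (fun acc2 k => addModAt acc2 (f j k) (g j k)) acc) init).getD t 0 : Int) : ZMod PB)
      = ((init.getD t 0 : Int) : ZMod PB)
        + (js.map (fun j => (ks.map (fun k => if f j k = t then ((g j k : Int) : ZMod PB) else 0)).sum)).sum := by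
  induction js generalizing init with
  | nil => simp
  | cons j js ih =>
      rw [List.foldl_cons, ih _ (by rw [foldl_addModAt_length]; exact ht),
        foldl_addModAt_cast ks (f j) (g j) init t ht]
      simp only [List.map_cons, List.sum_cons]
      ring

lemma foldl2_addModAt_bound (js ks : List Int) (f : Int → Int → Nat) (g : Int → Int → Int)
    (init : List Int)
    (hinit : ∀ t : Nat, 0 ≤ init.getD t 0 ∧ init.getD t 0 < pvMOD) :
    ∀ t : Nat, 0 ≤ (js.foldl (fun acc j => ks.foldl (fun acc2 k => addModAt acc2 (f j k) (g j k)) acc) init).getD t 0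
      ∧ (js.foldl (fun acc j => ks.foldl (fun acc2 k => addModAt acc2 (f j k) (g j k)) acc) init).getD t 0 < pvMOD := by
  induction js generalizing init with
  | nil => exact hinit
  | cons j js ih =>
      rw [List.foldl_cons]
      exact ih _ (foldl_addModAt_bound ks (f j) (g j) init hinit)

-- cast of an Int list sum
lemma cast_sum (L : List Int) : ((L.sum : Int) : ZMod PB) = (L.map (fun x : Int => ((x : Int) : ZMod PB))).sum := by
  induction L with
  | nil => simp
  | cons a L ih => simp [ih]

lemma getD_map_mod (L : List Int) (t : Nat) (ht : t < L.length) :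
    (L.map (fun x => x % pvMOD)).getD t 0 = (L.getD t 0) % pvMOD := by
  rw [List.getD_eq_getElem?_getD, List.getD_eq_getElem?_getD, List.getElem?_map,
    List.getElem?_eq_getElem ht]
  rfl

lemma pv_cast : (pvMOD : Int) = ((PB : ℕ) : ℤ) := by norm_num [PB, pvMOD]

lemma tval_lt (t : ZMod 13) : t.val < 13 := ZMod.val_lt t

-- replicate initial vector
lemma getD_replicate13 (t : Nat) : ((List.replicate 13 (0:Int)).getD t 0) = 0 := by
  rcases lt_or_ge t 13 with h | h
  · rw [List.getD_eq_getElem?_getD, List.getElem?_replicate]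
    simp [h]
  · rw [List.getD_eq_default _ _ (by simpa using h)]

lemma castmod13 (x : Int) : ((x % 13 : ℤ) : ZMod 13) = ((x : ℤ) : ZMod 13) := by
  rw [show ((13:ℤ)) = ((13:ℕ):ℤ) by norm_num, ZMod.intCast_mod]

-- inner k-loop of A, abstractly
lemma innerA13 (row : List Int) (j : Int) (t : ZMod 13) :
    ((PySem.List.pyRange 0 13 1).map (fun k =>
        ((if ((k*10+j) % 13).toNat = t.val then row.getD k.toNat 0 else 0 : Int) : ZMod PB))).sum
      = (Z13.map (fun m => if 10*m + ((j : Int) : ZMod 13) = t then toFV row m else 0)).sum := by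
  apply sum13
  intro k h0 h1
  have hcast : ((k*10+j : ℤ) : ZMod 13) = 10*((k:ℤ) : ZMod 13) + ((j:ℤ) : ZMod 13) := by
    push_cast; ring
  have hcond : (((k*10+j) % 13).toNat = t.val) ↔ (10*((k:ℤ):ZMod 13) + ((j:ℤ):ZMod 13) = t) := by
    rw [castIdx, hcast]
  have hval2 : toFV row ((k:ℤ):ZMod 13) = ((row.getD k.toNat 0 : Int) : ZMod PB) := by
    rw [toFV, val13 k h0 h1]
  rw [apply_ite (fun x : Int => (x : ZMod PB))]
  simp only [hcond, hval2, Int.cast_zero]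

-- ---- per-character bridge for A ----
lemma rowA_bound (row : List Int) (c : Char) :
    ∀ t : Nat, 0 ≤ (rowA row c).getD t 0 ∧ (rowA row c).getD t 0 < pvMOD := by
  intro t
  by_cases ht : t < (rowA row c).length
  · have hlen : t < (if c = '?' then
        (PySem.List.pyRange 0 10 1).foldl (fun acc j =>
          (PySem.List.pyRange 0 13 1).foldl (fun acc2 k =>
            addAt acc2 ((k*10+j) % 13).toNat (row.getD k.toNat 0)) acc)
          (List.replicate 13 0)
      else
        (PySem.List.pyRange 0 13 1).foldl (fun acc2 k =>
          addAt acc2 ((k*10 + pyIntChar c) % 13).toNat (row.getD k.toNat 0)) (List.replicate 13 0)).length := by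
      simpa [rowA] using ht
    have : (rowA row c).getD t 0 = _ % pvMOD := getD_map_mod _ t hlen
    rw [rowA] at this ⊢
    rw [this]
    exact ⟨Int.emod_nonneg _ (by norm_num [pvMOD]), Int.emod_lt_of_pos _ pvMOD_pos⟩
  · rw [List.getD_eq_default _ _ (by omega)]
    exact ⟨le_refl 0, pvMOD_pos⟩

lemma rowA_cast (row : List Int) (c : Char) (t : ZMod 13) :
    toFV (rowA row c) t = stepAAbs (toFV row) c t := by
  by_cases hc : c = '?'
  · rw [toFV]
    simp only [rowA, if_pos hc]
    rw [getD_map_mod _ _ (by simp only [foldl2_addAt_length, List.length_replicate]; exact tval_lt t),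
      pv_cast, ZMod.intCast_mod,
      foldl2_addAt_getD _ _ _ _ _ _ (by simp only [List.length_replicate]; exact tval_lt t),
      getD_replicate13, zero_add, cast_sum, List.map_map]
    simp only [stepAAbs, digsZ, digList, if_pos hc, List.map_map]
    apply congrArg List.sum
    apply List.map_congr_left
    intro j _
    simp only [Function.comp]
    rw [cast_sum, List.map_map]
    exact innerA13 row j t
  · rw [toFV]
    simp only [rowA, if_neg hc]
    rw [getD_map_mod _ _ (by simp only [foldl_addAt_length, List.length_replicate]; exact tval_lt t),
      pv_cast, ZMod.intCast_mod,
      foldl_addAt_getD _ _ _ _ _ (by simp only [List.length_replicate]; exact tval_lt t),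
      getD_replicate13, zero_add, cast_sum, List.map_map]
    simp only [stepAAbs, digsZ, digList, if_neg hc, List.map_cons, List.map_nil,
      List.sum_cons, List.sum_nil, add_zero]
    rw [Function.comp_def]
    exact innerA13 row (pyIntChar c) t

-- inner r-loop of B, abstractly
lemma innerB13 (cnt : List Int) (d pw : Int) (t : ZMod 13) :
    ((PySem.List.pyRange 0 13 1).map (fun r =>
        if ((r + d*pw % 13) % 13).toNat = t.val then ((cnt.getD r.toNat 0 : Int) : ZMod PB) else 0)).sum
      = toFV cnt (t - ((d : ℤ) : ZMod 13) * ((pw : ℤ) : ZMod 13)) := by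
  have hstep : ((PySem.List.pyRange 0 13 1).map (fun r =>
        if ((r + d*pw % 13) % 13).toNat = t.val then ((cnt.getD r.toNat 0 : Int) : ZMod PB) else 0)).sum
      = (Z13.map (fun m => if (t - ((d:ℤ):ZMod 13) * ((pw:ℤ):ZMod 13)) = m then toFV cnt m else 0)).sum := by
    apply sum13
    intro r h0 h1
    have hcast : ((r + d*pw % 13 : ℤ) : ZMod 13)
        = ((r:ℤ):ZMod 13) + ((d:ℤ):ZMod 13) * ((pw:ℤ):ZMod 13) := by
      push_cast
      rw [castmod13]
      push_cast
      ring
    have hcond : (((r + d*pw % 13) % 13).toNat = t.val)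
        ↔ ((t - ((d:ℤ):ZMod 13) * ((pw:ℤ):ZMod 13)) = ((r:ℤ):ZMod 13)) := by
      rw [castIdx, hcast]
      constructor
      · intro h; rw [← h]; ring
      · intro h; rw [← h]; ring
    have hval2 : toFV cnt ((r:ℤ):ZMod 13) = ((cnt.getD r.toNat 0 : Int) : ZMod PB) := by
      rw [toFV, val13 r h0 h1]
    simp only [hcond, hval2]
  rw [hstep, sum_ite_eq' Z13 _ nodup_Z13 (mem_Z13 _)]

-- ---- per-character bridge for B ----
lemma stepB_bound (pw : Int) (cnt : List Int) (c : Char) :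
    ∀ t : Nat, 0 ≤ (stepBImpl pw cnt c).getD t 0 ∧ (stepBImpl pw cnt c).getD t 0 < pvMOD := by
  simp only [stepBImpl]
  exact foldl2_addModAt_bound _ _ _ _ _ (fun t => by
    rw [getD_replicate13]; exact ⟨le_refl 0, pvMOD_pos⟩)

lemma stepB_cast (pw : Int) (cnt : List Int) (c : Char) (t : ZMod 13) :
    toFV (stepBImpl pw cnt c) t = stepBAbs ((pw : ℤ) : ZMod 13) (toFV cnt) c t := by
  rw [toFV]
  simp only [stepBImpl]
  rw [foldl2_addModAt_cast _ _ _ _ _ _ (by simp only [List.length_replicate]; exact tval_lt t),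
    getD_replicate13, Int.cast_zero, zero_add]
  simp only [stepBAbs, digsZ, List.map_map]
  apply congrArg List.sum
  apply List.map_congr_left
  intro d _
  simp only [Function.comp]
  exact innerB13 cnt d pw t

-- ---- initial vector ----
lemma getD_replicate0 (n t : Nat) : ((List.replicate n (0:Int)).getD t 0) = 0 := by
  rcases lt_or_ge t n with h | h
  · rw [List.getD_eq_getElem?_getD, List.getElem?_replicate]
    simp [h]
  · rw [List.getD_eq_default _ _ (by simpa using h)]

lemma init_cast (t : ZMod 13) : toFV (1 :: List.replicate 12 0) t = delta0 t := by
  rw [toFV, delta0]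
  by_cases h0 : t = 0
  · subst h0
    rfl
  · rw [if_neg h0]
    have hne : t.val ≠ 0 := fun h => h0 (by rwa [ZMod.val_eq_zero] at h)
    obtain ⟨m, hm⟩ := Nat.exists_eq_succ_of_ne_zero hne
    rw [hm, List.getD_cons_succ, getD_replicate0]
    simp

lemma init_bound : ∀ t : Nat, 0 ≤ ((1:Int) :: List.replicate 12 0).getD t 0
    ∧ ((1:Int) :: List.replicate 12 0).getD t 0 < pvMOD := by
  intro t
  cases t with
  | zero => exact ⟨by norm_num, by norm_num [pvMOD]⟩
  | succ m => rw [List.getD_cons_succ, getD_replicate0]; exact ⟨le_refl 0, pvMOD_pos⟩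

-- ---- fold assemblies ----
lemma foldA_cast (cs : List Char) (row : List Int) (t : ZMod 13) :
    toFV (cs.foldl rowA row) t = (cs.foldl stepAAbs (toFV row)) t := by
  induction cs generalizing row t with
  | nil => rfl
  | cons c rest ih =>
      rw [List.foldl_cons, List.foldl_cons, ih]
      have h : stepAAbs (toFV row) c = toFV (rowA row c) := by
        funext u; rw [rowA_cast]
      rw [h]

lemma foldA_bound (cs : List Char) (row : List Int)
    (h : ∀ t : Nat, 0 ≤ row.getD t 0 ∧ row.getD t 0 < pvMOD) :
    ∀ t : Nat, 0 ≤ (cs.foldl rowA row).getD t 0 ∧ (cs.foldl rowA row).getD t 0 < pvMOD := by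
  induction cs generalizing row with
  | nil => exact h
  | cons c rest ih => exact ih _ (rowA_bound row c)

def powList (n : ℕ) : List Int := (List.range n).map (fun i => (10:Int)^i % 13)

lemma powList_getD (n m : ℕ) (hm : m < n) :
    PySem.List.pyGetD (powList n) (m : Int) 0 = (10:Int)^m % 13 := by
  rw [PySem.List.pyGetD_natCast, powList, List.getD_eq_getElem?_getD, List.getElem?_map,
    List.getElem?_range hm]
  rfl

lemma foldB_cast (cs : List Char) (n : ℕ) (hn : cs.length ≤ n) (t : ZMod 13) :
    toFV ((PySem.List.enumerate cs.reverse).foldl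
        (fun cnt p => stepBImpl (PySem.List.pyGetD (powList n) p.1 0) cnt p.2)
        (1 :: List.replicate 12 0)) t
      = semB cs t := by
  induction cs generalizing t with
  | nil =>
      show toFV (1 :: List.replicate 12 0) t = semB [] t
      rw [init_cast]; rfl
  | cons c rest ih =>
      have hrev : (c :: rest).reverse = rest.reverse ++ [c] := by simp
      rw [hrev, PySem.List.enumerate_append, List.foldl_append]
      have hone : PySem.List.enumerate [c] ((0:Int) + rest.reverse.length) = [((rest.length : Int), c)] := by
        rw [PySem.List.enumerate_cons, PySem.List.enumerate_nil]
        simp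
      rw [hone, List.foldl_cons, List.foldl_nil]
      rw [powList_getD n rest.length (by simpa using Nat.lt_of_lt_of_le (Nat.lt_succ_self _) hn)]
      rw [stepB_cast]
      have hpw : (((10:Int)^rest.length % 13 : ℤ) : ZMod 13) = (10 : ZMod 13) ^ rest.length := by
        rw [castmod13]; push_cast; rfl
      have hsem : toFV ((PySem.List.enumerate rest.reverse).foldl
          (fun cnt p => stepBImpl (PySem.List.pyGetD (powList n) p.1 0) cnt p.2)
          (1 :: List.replicate 12 0)) = semB rest := by
        funext u; exact ih (Nat.le_of_succ_le hn) u
      rw [hpw, hsem]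
      rfl

lemma foldB_bound_gen (n : ℕ) (ps : List (Int × Char)) (init : List Int)
    (h : ∀ t : Nat, 0 ≤ init.getD t 0 ∧ init.getD t 0 < pvMOD) :
    ∀ t : Nat, 0 ≤ (ps.foldl (fun cnt p => stepBImpl (PySem.List.pyGetD (powList n) p.1 0) cnt p.2) init).getD t 0
      ∧ (ps.foldl (fun cnt p => stepBImpl (PySem.List.pyGetD (powList n) p.1 0) cnt p.2) init).getD t 0 < pvMOD := by
  induction ps generalizing init with
  | nil => exact h
  | cons p ps ih => exact ih _ (stepB_bound _ _ _)

lemma int_eq_of_cast (a b : Int) (h : ((a : Int) : ZMod PB) = b)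
    (ha0 : 0 ≤ a) (ha1 : a < pvMOD) (hb0 : 0 ≤ b) (hb1 : b < pvMOD) : a = b := by
  have h2 : a % ((PB:ℕ):ℤ) = b % ((PB:ℕ):ℤ) := (ZMod.intCast_eq_intCast_iff a b PB).mp h
  rw [← pv_cast] at h2
  rwa [Int.emod_eq_of_lt ha0 ha1, Int.emod_eq_of_lt hb0 hb1] at h2


-- ===== VERDICT (by name: the statement is the Claim_ definition above) =====
theorem solve_spec : Claim_equal_solve := by
  unfold Claim_equal_solve Spec_solve
  intro s _ _
  show (s.toList.foldl rowA (1 :: List.replicate 12 0)).getD 5 0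
      = ((PySem.List.enumerate s.toList.reverse).foldl
          (fun cnt p => stepBImpl (PySem.List.pyGetD (powList s.toList.length) p.1 0) cnt p.2)
          (1 :: List.replicate 12 0)).getD 5 0
  have hA := foldA_bound s.toList (1 :: List.replicate 12 0) init_bound 5
  have hB := foldB_bound_gen s.toList.length (PySem.List.enumerate s.toList.reverse)
      (1 :: List.replicate 12 0) init_bound 5
  apply int_eq_of_cast _ _ _ hA.1 hA.2 hB.1 hB.2
  have hcastA : ((( s.toList.foldl rowA (1 :: List.replicate 12 0)).getD 5 0 : Int) : ZMod PB)
      = toFV (s.toList.foldl rowA (1 :: List.replicate 12 0)) (5 : ZMod 13) := rfl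
  have hcastB : ((((PySem.List.enumerate s.toList.reverse).foldl
          (fun cnt p => stepBImpl (PySem.List.pyGetD (powList s.toList.length) p.1 0) cnt p.2)
          (1 :: List.replicate 12 0)).getD 5 0 : Int) : ZMod PB)
      = toFV ((PySem.List.enumerate s.toList.reverse).foldl
          (fun cnt p => stepBImpl (PySem.List.pyGetD (powList s.toList.length) p.1 0) cnt p.2)
          (1 :: List.replicate 12 0)) (5 : ZMod 13) := rfl
  rw [hcastA, hcastB, foldA_cast, foldB_cast s.toList s.toList.length (le_refl _)]
  have hinit : toFV (1 :: List.replicate 12 0) = delta0 := funext init_cast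
  rw [hinit, absAB']
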